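-- pv_equiv track=rewrite | github.com/MendozaLab/erdos-experiments | Erdos30/singer_dispersion.py | verify_perfect_diff_set
-- ===== SOURCE A (Python) =====
-- from collections import Counter
--
-- def verify_perfect_diff_set(A, N):
--     """
--     Check that A is a (N, |A|, 1)-perfect difference set:
--     every nonzero element of Z_N appears exactly once as a-b (a,b ∈ A, a≠b).
--     Returns (is_perfect, n_diffs_covered, max_mult).
--     """
--     diff_count = Counter()
--     for a in A:
--         for b in A:
--             if a != b:
--                 diff_count[(a - b) % N] += 1
--     vals = list(diff_count.values())
--     if not vals:
--         return False, 0, 0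
--     return (all(v == 1 for v in vals) and len(diff_count) == N - 1), len(diff_count), max(vals)
-- ===== SOURCE B (Python) =====
-- def verify_perfect_diff_set(A, N):
--     """
--     Check that A is a (N, |A|, 1)-perfect difference set:
--     every nonzero element of Z_N appears exactly once as a-b (a,b in A, a!=b).
--     Returns (is_perfect, n_diffs_covered, max_mult).
--     Sort-and-scan: collect all pairwise differences, sort them, then one
--     linear run-length pass computes the distinct count and max multiplicity.
--     """
--     diffs = [(a - b) % N for a in A for b in A if a != b]
--     diffs.sort()
--     if not diffs:
--         return False, 0, 0
--     prev = None
--     run = 0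
--     max_mult = 0
--     distinct = 0
--     for d in diffs:
--         if prev is None or d != prev:
--             prev = d
--             run = 1
--             distinct += 1
--         else:
--             run += 1
--         if run > max_mult:
--             max_mult = run
--     return (max_mult == 1 and distinct == N - 1), distinct, max_mult
-- ===== Notes on version B (the rewrite author's own statement) =====
-- stated objective: alternative
-- what changed: Replaces the Counter-of-differences with collecting all pairwise differences into one list, sorting it, and a single run-length scan over the sorted list that tracks the current run, the longest run (max multiplicity) and a distinct-value counter; perfection is then max_mult==1 and distinct==N-1.
import Mathlib
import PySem

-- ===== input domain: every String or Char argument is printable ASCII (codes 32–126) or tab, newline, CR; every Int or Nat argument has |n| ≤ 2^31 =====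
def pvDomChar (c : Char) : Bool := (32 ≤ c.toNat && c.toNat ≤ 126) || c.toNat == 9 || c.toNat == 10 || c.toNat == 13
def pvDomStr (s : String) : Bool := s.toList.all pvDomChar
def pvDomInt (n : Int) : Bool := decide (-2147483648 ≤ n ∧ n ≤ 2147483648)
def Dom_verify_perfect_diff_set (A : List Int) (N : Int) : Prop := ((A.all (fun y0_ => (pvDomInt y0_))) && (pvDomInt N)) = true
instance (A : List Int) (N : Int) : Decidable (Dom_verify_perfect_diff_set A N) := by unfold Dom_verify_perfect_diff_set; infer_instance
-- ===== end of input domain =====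

-- B replaces A's Counter of pairwise differences by sort-then-run-length-scan (alternative algorithm, same results).


-- ===== PORT A =====
def verify_perfect_diff_set (A : List Int) (N : Int) : Bool × Int × Int :=
  let diff_count : PySem.Dict Int Int :=
    A.foldl (fun d a =>
      A.foldl (fun d b =>
        if a ≠ b then d.modify (PySem.Int.mod (a - b) N) 0 (· + 1) else d) d)
      PySem.Dict.empty
  let vals := diff_count.values
  if vals = [] then (false, 0, 0)
  else
    ((vals.all (fun v => v == 1)) && (((diff_count.size : Int)) == N - 1),
     (diff_count.size : Int),
     (PySem.List.max? vals (fun v => v)).getD 0)   -- max(vals); vals ≠ [] here so max? is some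

-- ===== PORT B =====
-- diffs = [(a - b) % N for a in A for b in A if a != b]
def vpds_diffs (A : List Int) (N : Int) : List Int :=
  A.flatMap (fun a => ((A.filter (fun b => a ≠ b)).map (fun b => PySem.Int.mod (a - b) N)))

-- the run-length scan over a list: state (prev, run, max_mult, distinct), returns (distinct, max_mult)
def vpds_scan : List Int → Option Int → Int → Int → Int → Int × Int
  | [], _, _, maxm, distinct => (distinct, maxm)
  | d :: rest, prev, run, maxm, distinct =>
    let st : Option Int × Int × Int :=
      match prev with
      | none => (some d, 1, distinct + 1)
      | some pv => if d ≠ pv then (some d, 1, distinct + 1) else (prev, run + 1, distinct)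
    let maxm' := if st.2.1 > maxm then st.2.1 else maxm
    vpds_scan rest st.1 st.2.1 maxm' st.2.2

def verify_perfect_diff_set_alt (A : List Int) (N : Int) : Bool × Int × Int :=
  let ds := PySem.List.sorted (vpds_diffs A N) (fun x => x) false
  if ds = [] then (false, 0, 0)
  else
    let r := vpds_scan ds none 0 0 0
    ((r.2 == 1) && (r.1 == N - 1), r.1, r.2)

-- ===== PRECONDITION & SPEC =====
-- Pre_ excludes exactly the inputs where Python A raises ZeroDivisionError: N = 0 while A
-- contains two distinct values (then (a-b) % 0 is evaluated); B raises there too.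
def Pre_verify_perfect_diff_set (A : List Int) (N : Int) : Prop :=
  N ≠ 0 ∨ ∀ a ∈ A, ∀ b ∈ A, a = b
instance (A : List Int) (N : Int) : Decidable (Pre_verify_perfect_diff_set A N) := by
  unfold Pre_verify_perfect_diff_set; infer_instance
def pvWitness_verify_perfect_diff_set : List Int × Int := ([0, 1, 3], 7)

def Spec_verify_perfect_diff_set (A : List Int) (N : Int) (out : Bool × Int × Int) : Prop := out = verify_perfect_diff_set_alt A N
instance (A : List Int) (N : Int) (out : Bool × Int × Int) : Decidable (Spec_verify_perfect_diff_set A N out) := by unfold Spec_verify_perfect_diff_set; infer_instance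

-- ===== CLAIM (what is proved, stated in full; the proofs are below) =====
def Claim_equal_verify_perfect_diff_set : Prop := ∀ (A : List Int) (N : Int), Dom_verify_perfect_diff_set A N → Pre_verify_perfect_diff_set A N → Spec_verify_perfect_diff_set A N (verify_perfect_diff_set A N)

-- ===== LEMMAS AND PROOFS =====

-- A's nested counting loop builds exactly Counter(diffs)
theorem vpds_dict_eq (A : List Int) (N : Int) :
    A.foldl (fun d a =>
      A.foldl (fun d b =>
        if a ≠ b then d.modify (PySem.Int.mod (a - b) N) 0 (· + 1) else d) d)
      PySem.Dict.empty
    = PySem.Dict.counter (vpds_diffs A N) := by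
  rw [PySem.Dict.counter_eq_foldl, vpds_diffs, List.foldl_flatMap]
  have h : (fun (d : PySem.Dict Int Int) (a : Int) =>
      A.foldl (fun d b =>
        if a ≠ b then d.modify (PySem.Int.mod (a - b) N) 0 (· + 1) else d) d)
      = (fun (d : PySem.Dict Int Int) (a : Int) =>
      ((A.filter (fun b => a ≠ b)).map (fun b => PySem.Int.mod (a - b) N)).foldl
        (fun d x => d.modify x 0 (· + 1)) d) := by
    funext d a
    rw [PySem.List.foldl_ite_eq_foldl_filter (p := fun b => a ≠ b), List.foldl_map]
  rw [h]

-- distinct count of a PySem.Set.ofList is the Finset cardinality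
theorem vpds_set_len (xs : List Int) : (PySem.Set.ofList xs).length = xs.toFinset.card := by
  have hn := PySem.Set.nodup_ofList xs
  have he : (PySem.Set.ofList xs).toFinset = xs.toFinset := by
    apply Finset.ext; intro a; simp [List.mem_toFinset, PySem.Set.mem_ofList]
  rw [← List.toFinset_card_of_nodup hn, he]

-- a sorted list starts with the full block of copies of its head
theorem vpds_span : ∀ (ds : List Int), ds.Pairwise (· ≤ ·) → ∀ d : Int, (∀ x ∈ ds, d ≤ x) →
    ∃ (k : Nat) (ys : List Int), ds = List.replicate k d ++ ys ∧ ys.Pairwise (· ≤ ·) ∧ ∀ y ∈ ys, d < y := by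
  intro ds
  induction ds with
  | nil => exact fun _ d _ => ⟨0, [], rfl, List.Pairwise.nil, by simp⟩
  | cons x t ih =>
    intro hp d hd
    by_cases hx : x = d
    · subst hx
      obtain ⟨k, ys, h1, h2, h3⟩ :=
        ih (List.pairwise_cons.mp hp).2 x (List.pairwise_cons.mp hp).1
      exact ⟨k + 1, ys, by simp [List.replicate_succ, h1], h2, h3⟩
    · refine ⟨0, x :: t, by simp, hp, ?_⟩
      intro y hy
      have hdx : d < x := lt_of_le_of_ne (hd x (by simp)) (fun h => hx h.symm)
      rcases List.mem_cons.mp hy with h | h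
      · omega
      · exact lt_of_lt_of_le hdx ((List.pairwise_cons.mp hp).1 y h)

-- consuming a block of j further copies of the current value d
theorem vpds_run : ∀ (j : Nat) (d : Int) (ys : List Int) (r m dist : Int), r ≤ m →
    vpds_scan (List.replicate j d ++ ys) (some d) r m dist
      = vpds_scan ys (some d) (r + (j : Int)) (max m (r + (j : Int))) dist := by
  intro j
  induction j with
  | zero => intro d ys r m dist h; simp [max_eq_left h]
  | succ n ih =>
    intro d ys r m dist h
    rw [List.replicate_succ, List.cons_append, vpds_scan]
    simp only [ne_eq, not_true_eq_false, if_false]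
    have e1 : (if r + 1 > m then r + 1 else m) = max m (r + 1) := by
      rw [max_def]; split_ifs <;> omega
    rw [e1, ih d ys (r + 1) (max m (r + 1)) dist (le_max_right _ _)]
    have e2 : r + 1 + (n : Int) = r + ((n : Nat) + 1 : Nat) := by push_cast; ring
    rw [e2]
    have e3 : max (max m (r + 1)) (r + ((n : Nat) + 1 : Nat)) = max m (r + ((n : Nat) + 1 : Nat)) := by
      rw [max_assoc, max_eq_right (by push_cast; omega : (r + 1 : Int) ≤ r + ((n : Nat) + 1 : Nat))]
    rw [e3]

-- the run-length scan on a sorted list: distinct-count is the number of distinct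
-- values and the final max is an achieved maximum of the multiplicities
theorem vpds_scan_lemma : ∀ (n : Nat) (ds : List Int), ds.length ≤ n → ds.Pairwise (· ≤ ·) →
    ∀ (p : Option Int), (∀ v, p = some v → ∀ y ∈ ds, v < y) →
    ∀ (r m dist : Int), 0 ≤ m →
    (vpds_scan ds p r m dist).1 = dist + (ds.toFinset.card : Int) ∧
    ((vpds_scan ds p r m dist).2 = m ∨ ∃ v ∈ ds, (vpds_scan ds p r m dist).2 = (ds.count v : Int)) ∧
    m ≤ (vpds_scan ds p r m dist).2 ∧
    ∀ v ∈ ds, (ds.count v : Int) ≤ (vpds_scan ds p r m dist).2 := by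
  intro n
  induction n with
  | zero =>
    intro ds hlen _ p _ r m dist hm
    have : ds = [] := List.length_eq_zero_iff.mp (Nat.le_zero.mp hlen)
    subst this
    simp [vpds_scan]
  | succ n ih =>
    intro ds hlen hp p hplt r m dist hm
    match ds with
    | [] => simp [vpds_scan]
    | d :: t =>
      have hd_le : ∀ x ∈ d :: t, d ≤ x := by
        intro x hx
        rcases List.mem_cons.mp hx with h | h
        · omega
        · exact (List.pairwise_cons.mp hp).1 x h
      obtain ⟨k, ys, hds, hys_pair, hys_lt⟩ := vpds_span (d :: t) hp d hd_le
      have hdnys : d ∉ ys := fun h => lt_irrefl d (hys_lt d h)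
      have hk : k ≠ 0 := by
        intro h0; subst h0
        simp only [List.replicate, List.nil_append] at hds
        exact hdnys (hds ▸ List.mem_cons_self)
      obtain ⟨k', rfl⟩ : ∃ k', k = k' + 1 :=
        ⟨k - 1, (Nat.succ_pred_eq_of_pos (Nat.pos_of_ne_zero hk)).symm⟩
      have ht : t = List.replicate k' d ++ ys := by
        have h2 := hds
        rw [List.replicate_succ, List.cons_append] at h2
        injection h2
      -- one scan step opens a new run at d
      have hstep : vpds_scan (d :: t) p r m dist
          = vpds_scan t (some d) 1 (if (1 : Int) > m then 1 else m) (dist + 1) := by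
        cases p with
        | none => rw [vpds_scan]
        | some pv =>
          have hne : d ≠ pv := by
            have := hplt pv rfl d (by simp); omega
          rw [vpds_scan]; simp [hne]
      have hm1 : (if (1 : Int) > m then 1 else m) = max m 1 := by
        rw [max_def]; split_ifs <;> omega
      set K : Int := ((k' : Int) + 1) with hK
      have hrun : vpds_scan t (some d) 1 (max m 1) (dist + 1)
          = vpds_scan ys (some d) K (max m K) (dist + 1) := by
        rw [ht, vpds_run k' d ys 1 (max m 1) (dist + 1) (le_max_right _ _)]
        have e2 : max (max m 1) ((1 : Int) + (k' : Int)) = max m ((1 : Int) + (k' : Int)) := by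
          rw [max_assoc, max_eq_right (by omega : (1 : Int) ≤ 1 + (k' : Int))]
        have e1 : (1 : Int) + (k' : Int) = K := by rw [hK]; ring
        rw [e2, e1]
      have hR := hstep.trans (by rw [hm1, hrun])
      -- induction hypothesis on the strictly larger tail ys
      have hyslen : ys.length ≤ n := by
        have : (d :: t).length = (k' + 1) + ys.length := by
          rw [hds]; simp [List.length_append, List.length_replicate]
        simp only [List.length_cons] at this hlen
        omega
      have hplt' : ∀ v, (some d : Option Int) = some v → ∀ y ∈ ys, v < y := by
        intro v hv; injection hv with hv; subst hv; exact hys_lt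
      have hmK : 0 ≤ max m K := le_trans hm (le_max_left _ _)
      obtain ⟨ih1, ih2, ih3, ih4⟩ := ih ys hyslen hys_pair (some d) hplt' K (max m K) (dist + 1) hmK
      -- facts relating ds = d :: t to ys
      have hfin : (d :: t).toFinset = insert d ys.toFinset := by
        rw [hds, List.toFinset_append, List.toFinset_replicate_of_ne_zero (by omega)]
        exact Finset.singleton_union d ys.toFinset
      have hcard : ((d :: t).toFinset.card : Int) = 1 + (ys.toFinset.card : Int) := by
        rw [hfin, Finset.card_insert_of_notMem (by simp [hdnys])]; push_cast; ring
      have hcount_d : ((d :: t).count d : Int) = K := by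
        rw [hds, List.count_append, List.count_replicate, if_pos (by simp),
          List.count_eq_zero.mpr hdnys, hK]
        push_cast; ring
      have hcount_ys : ∀ v ∈ ys, (d :: t).count v = ys.count v := by
        intro v hv
        have hvd : (d == v) = false := by
          simp only [beq_eq_false_iff_ne, ne_eq]
          intro h; subst h; exact lt_irrefl d (hys_lt d hv)
        rw [hds, List.count_append, List.count_replicate, if_neg (by simp [hvd]), Nat.zero_add]
      have hmem : ∀ v, v ∈ (d :: t) ↔ v = d ∨ v ∈ ys := by
        intro v
        rw [hds, List.mem_append, List.mem_replicate]
        constructor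
        · rintro (⟨_, h⟩ | h)
          · exact Or.inl h
          · exact Or.inr h
        · rintro (h | h)
          · exact Or.inl ⟨by omega, h⟩
          · exact Or.inr h
      rw [hR]
      refine ⟨?_, ?_, ?_, ?_⟩
      · rw [ih1, hcard]; ring
      · rcases ih2 with h | ⟨v, hv, h⟩
        · rcases max_choice m K with hc | hc
          · exact Or.inl (by rw [h, hc])
          · refine Or.inr ⟨d, by simp, ?_⟩
            rw [h, hc, hcount_d]
        · refine Or.inr ⟨v, (hmem v).mpr (Or.inr hv), ?_⟩
          rw [h, hcount_ys v hv]
      · exact le_trans (le_trans (le_max_left m K) ih3) le_rfl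
      · intro v hv
        rcases (hmem v).mp hv with h | h
        · subst h
          rw [hcount_d]
          exact le_trans (le_max_right m K) ih3
        · rw [hcount_ys v h]
          exact ih4 v h

-- assembling: A's Counter statistics equal B's sorted run-length statistics
theorem vpds_main (A : List Int) (N : Int) :
    verify_perfect_diff_set A N = verify_perfect_diff_set_alt A N := by
  simp only [verify_perfect_diff_set, verify_perfect_diff_set_alt, vpds_dict_eq]
  set diffs := vpds_diffs A N with hdiffs
  by_cases hnil : diffs = []
  · simp [hnil, PySem.Dict.values, PySem.Dict.items_counter, PySem.List.sorted_eq_nil_iff,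
]
  · have hvals : (PySem.Dict.counter diffs).values
        = (PySem.Set.ofList diffs).map (fun k => ((diffs.count k : Nat) : Int)) := by
      simp [PySem.Dict.values, PySem.Dict.items_counter, List.map_map, Function.comp]
    have hsize : ((PySem.Dict.counter diffs).size : Int)
        = ((PySem.Set.ofList diffs).length : Int) := by
      simp [PySem.Dict.size, PySem.Dict.items_counter]
    have hSne : PySem.Set.ofList diffs ≠ [] := by
      obtain ⟨x, hx⟩ := List.exists_mem_of_ne_nil diffs hnil
      exact List.ne_nil_of_mem ((PySem.Set.mem_ofList diffs x).mpr hx)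
    have hvne : (PySem.Dict.counter diffs).values ≠ [] := by
      rw [hvals]; simpa using hSne
    set ds := PySem.List.sorted diffs (fun x => x) false with hds
    have hdsne : ds ≠ [] := by
      rw [hds]; simpa [PySem.List.sorted_eq_nil_iff] using hnil
    rw [if_neg hvne, if_neg hdsne]
    have hperm : ds.Perm diffs := PySem.List.sorted_perm diffs (fun x => x) false
    have hpair : ds.Pairwise (· ≤ ·) := PySem.List.sorted_pairwise diffs (fun x => x)
    obtain ⟨h1, h2, h3, h4⟩ :=
      vpds_scan_lemma ds.length ds le_rfl hpair none (by intro v hv; cases hv) 0 0 0 le_rfl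
    set R := vpds_scan ds none 0 0 0 with hR
    have hcard : (ds.toFinset.card : Int) = ((PySem.Set.ofList diffs).length : Int) := by
      rw [List.toFinset_eq_of_perm ds diffs hperm, vpds_set_len]
    have hdistinct : R.1 = ((PySem.Dict.counter diffs).size : Int) := by
      rw [h1, hcard, hsize]; ring
    obtain ⟨mA, hmA⟩ : ∃ mA,
        PySem.List.max? ((PySem.Dict.counter diffs).values) (fun v => v) = some mA := by
      cases hmax : PySem.List.max? ((PySem.Dict.counter diffs).values) (fun v => v) with
      | none => exact absurd ((PySem.List.max?_eq_none_iff _ _).mp hmax) hvne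
      | some m => exact ⟨m, rfl⟩
    have hmA_mem := PySem.List.max?_mem hmA
    have hmA_max := PySem.List.max?_isMax hmA
    have hvals_mem : ∀ y, y ∈ (PySem.Dict.counter diffs).values
        ↔ ∃ v ∈ diffs, y = ((diffs.count v : Nat) : Int) := by
      intro y
      rw [hvals]
      simp only [List.mem_map, PySem.Set.mem_ofList]
      constructor
      · rintro ⟨v, hv, rfl⟩; exact ⟨v, hv, rfl⟩
      · rintro ⟨v, hv, rfl⟩; exact ⟨v, hv, rfl⟩
    have hR2pos : (1 : Int) ≤ R.2 := by
      obtain ⟨x, hx⟩ := List.exists_mem_of_ne_nil ds hdsne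
      have hb := h4 x hx
      have hc : 0 < ds.count x := List.count_pos_iff.mpr hx
      omega
    have hR2 : ∃ v ∈ diffs, R.2 = ((diffs.count v : Nat) : Int) := by
      rcases h2 with h | ⟨v, hv, h⟩
      · exfalso; omega
      · exact ⟨v, hperm.mem_iff.mp hv, by rw [h, hperm.count_eq v]⟩
    have hR2max : ∀ v ∈ diffs, ((diffs.count v : Nat) : Int) ≤ R.2 := by
      intro v hv
      have hb := h4 v (hperm.mem_iff.mpr hv)
      rwa [hperm.count_eq v] at hb
    have hmaxeq : mA = R.2 := by
      obtain ⟨v1, hv1, he1⟩ := (hvals_mem mA).mp hmA_mem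
      obtain ⟨v2, hv2, he2⟩ := hR2
      have l1 : mA ≤ R.2 := he1 ▸ hR2max v1 hv1
      have l2 : R.2 ≤ mA := by
        have hmem2 : ((diffs.count v2 : Nat) : Int) ∈ (PySem.Dict.counter diffs).values :=
          (hvals_mem _).mpr ⟨v2, hv2, rfl⟩
        have := hmA_max _ hmem2
        omega
      omega
    have hall : ((PySem.Dict.counter diffs).values.all (fun v => v == 1)) = (R.2 == 1) := by
      obtain ⟨v2, hv2, he2⟩ := hR2
      by_cases hone : R.2 = 1
      · have hall1 : ∀ y ∈ (PySem.Dict.counter diffs).values, y = 1 := by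
          intro y hy
          obtain ⟨v, hv, rfl⟩ := (hvals_mem y).mp hy
          have hle := hR2max v hv
          have hge : 0 < diffs.count v := List.count_pos_iff.mpr hv
          omega
        rw [hone]
        have hbeq : ((1 : Int) == 1) = true := by simp
        rw [hbeq, List.all_eq_true]
        intro y hy
        simpa using hall1 y hy
      · have hYmem : R.2 ∈ (PySem.Dict.counter diffs).values :=
          (hvals_mem _).mpr ⟨v2, hv2, he2⟩
        have hf : ((PySem.Dict.counter diffs).values.all (fun v => v == 1)) = false := by
          rw [List.all_eq_false]
          exact ⟨R.2, hYmem, by simp [hone]⟩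
        rw [hf]
        simp [hone]
    rw [hmA, hall, hdistinct, hmaxeq]
    rfl

-- ===== VERDICT (by name: the statement is the Claim_ definition above) =====
theorem verify_perfect_diff_set_spec : Claim_equal_verify_perfect_diff_set := by
  intro A N _ _
  unfold Spec_verify_perfect_diff_set
  exact vpds_main A N
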